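-- pv_equiv track=rewrite | github.com/maninbule/teachPythonLeetcode | 00-Basic Programs/基础测试03/09-删除数组中前三大的元素.py | deleteTop3
-- ===== SOURCE A (Python) =====
-- def deleteTop3(arr:list[int])->list[int]:
--     # 前三大的元素
--     # set 把前三大的元素放到set里面
--     # 进行一次arr数组拷贝，然后拷贝的那一份进行排序
--     # 对排序后的前三大元素放进set
--     # 遍历原来的arr，把非前三大的元素放进一个新的list里面
--     from copy import copy
--     top3 = set()
--     cpy = copy(arr)
--     # cpy = [x for x in arr]
--     cpy.sort(key=lambda x:-x)
--     for i in range(3):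
--         top3.add(cpy[i])
--     ans = []
--     for v in arr:
--         if v not in top3:
--             ans.append(v)
--     return ans
-- ===== SOURCE B (Python) =====
-- def deleteTop3(arr: list[int]) -> list[int]:
--     # Single O(n) pass tracking the three largest values (with multiplicity),
--     # then one filtering pass -- no sort.
--     m1 = m2 = m3 = None
--     for v in arr:
--         if m1 is None or v > m1:
--             m1, m2, m3 = v, m1, m2
--         elif m2 is None or v > m2:
--             m2, m3 = v, m2
--         elif m3 is None or v > m3:
--             m3 = v
--     top = {m1, m2, m3}
--     return [v for v in arr if v not in top]
-- ===== Notes on version B (the rewrite author's own statement) =====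
-- stated objective: faster
-- what changed: B replaces A's full descending sort (then taking the first three) with a single linear pass maintaining the three largest values in three variables, then one filtering pass; Pre_ excludes only lists shorter than 3, on which A raises IndexError.
-- outside the precondition, e.g. on deleteTop3([]): A raises IndexError, B returns []; on deleteTop3([0]): A raises IndexError, B returns []; on deleteTop3([1]): A raises IndexError, B returns []
import Mathlib
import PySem

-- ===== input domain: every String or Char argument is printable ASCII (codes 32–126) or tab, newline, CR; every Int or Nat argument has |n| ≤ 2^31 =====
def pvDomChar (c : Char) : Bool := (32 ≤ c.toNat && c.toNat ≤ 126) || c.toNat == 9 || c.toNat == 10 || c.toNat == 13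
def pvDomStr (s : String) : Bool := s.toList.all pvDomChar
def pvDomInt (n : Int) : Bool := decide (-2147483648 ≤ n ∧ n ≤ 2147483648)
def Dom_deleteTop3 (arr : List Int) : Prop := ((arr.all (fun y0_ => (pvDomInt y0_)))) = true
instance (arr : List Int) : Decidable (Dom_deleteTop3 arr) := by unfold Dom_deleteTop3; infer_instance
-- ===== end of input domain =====

-- B replaces A's full descending sort with one linear pass keeping the three largest
-- values in three variables, then filters; equivalence is proved for lists of length ≥ 3
-- (on shorter lists A raises IndexError, which Pre_deleteTop3 excludes).

-- ===== PORT A =====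
def deleteTop3 (arr : List Int) : List Int :=
  let cpy := PySem.List.sorted arr (fun x => -x) false
  let top3 := (PySem.List.pyRange 0 3 1).foldl
    (fun s i => PySem.Set.add s (PySem.List.pyGetD cpy i 0)) PySem.Set.empty
  arr.foldl (fun ans v => if !(PySem.Set.contains top3 v) then ans ++ [v] else ans) []

-- ===== PORT B =====
-- one step of B's loop over (m1, m2, m3) (None = Option.none)
def t3step (t : Option Int × Option Int × Option Int) (v : Int) :
    Option Int × Option Int × Option Int :=
  match t with
  | (m1, m2, m3) =>
    if (match m1 with | none => true | some a => decide (v > a)) then (some v, m1, m2)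
    else if (match m2 with | none => true | some b => decide (v > b)) then (m1, some v, m2)
    else if (match m3 with | none => true | some c => decide (v > c)) then (m1, m2, some v)
    else (m1, m2, m3)

def deleteTop3_alt (arr : List Int) : List Int :=
  let t := arr.foldl t3step (none, none, none)
  arr.filter (fun v => !(some v == t.1 || some v == t.2.1 || some v == t.2.2))

-- ===== PRECONDITION & SPEC =====
-- A indexes cpy[0], cpy[1], cpy[2]: on lists shorter than 3 it raises IndexError.
def Pre_deleteTop3 (arr : List Int) : Prop := 3 ≤ arr.length
instance (arr : List Int) : Decidable (Pre_deleteTop3 arr) := by unfold Pre_deleteTop3; infer_instance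
def pvWitness_deleteTop3 : List Int := [5, 3, 9, 1, 9]

def Spec_deleteTop3 (arr : List Int) (out : List Int) : Prop := out = deleteTop3_alt arr
instance (arr : List Int) (out : List Int) : Decidable (Spec_deleteTop3 arr out) := by unfold Spec_deleteTop3; infer_instance

-- ===== CLAIM (what is proved, stated in full; the proofs are below) =====
def Claim_equal_deleteTop3 : Prop := ∀ (arr : List Int), Dom_deleteTop3 arr → Pre_deleteTop3 arr → Spec_deleteTop3 arr (deleteTop3 arr)

-- ===== LEMMAS AND PROOFS =====

-- the comparator PySem.List.sorted arr (fun x => -x) false inserts with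
def pvBef (a b : Int) : Bool := decide ((-a : Int) < -b)

-- the first three elements of a list, as B's (m1, m2, m3) state
def pvEnc : List Int → Option Int × Option Int × Option Int
  | [] => (none, none, none)
  | [a] => (some a, none, none)
  | [a, b] => (some a, some b, none)
  | a :: b :: c :: _ => (some a, some b, some c)

theorem t3step_insertBy (v : Int) (s : List Int) :
    t3step (pvEnc s) v = pvEnc (PySem.List.insertBy pvBef v s) := by
  match s with
  | [] => rfl
  | [a] =>
    by_cases h : a < v <;>
      simp [t3step, pvEnc, PySem.List.insertBy, pvBef, h]
  | [a, b] =>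
    by_cases h1 : a < v <;> by_cases h2 : b < v <;>
      simp [t3step, pvEnc, PySem.List.insertBy, pvBef, h1, h2]
  | a :: b :: c :: rest =>
    by_cases h1 : a < v <;> by_cases h2 : b < v <;> by_cases h3 : c < v <;>
      simp [t3step, pvEnc, PySem.List.insertBy, pvBef, h1, h2, h3]

theorem foldl_t3step_enc (l : List Int) : ∀ (s : List Int),
    l.foldl t3step (pvEnc s) =
      pvEnc (l.foldl (fun acc x => PySem.List.insertBy pvBef x acc) s) := by
  induction l with
  | nil => intro s; rfl
  | cons v l ih =>
    intro s
    simp only [List.foldl_cons, t3step_insertBy]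
    exact ih _

theorem foldl_t3step_sorted (arr : List Int) :
    arr.foldl t3step (none, none, none) =
      pvEnc (PySem.List.sorted arr (fun x => -x) false) := by
  rw [PySem.List.sorted_eq_foldl_insertBy]
  exact foldl_t3step_enc arr []

-- ===== VERDICT (by name: the statement is the Claim_ definition above) =====
theorem deleteTop3_spec : Claim_equal_deleteTop3 := by
  intro arr _ hpre
  unfold Spec_deleteTop3 deleteTop3 deleteTop3_alt
  rw [foldl_t3step_sorted]
  have hlen : 3 ≤ (PySem.List.sorted arr (fun x => -x) false).length := by
    rw [PySem.List.length_sorted]; exact hpre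
  obtain ⟨a, b, c, rest, hs⟩ :
      ∃ a b c rest, PySem.List.sorted arr (fun x => -x) false = a :: b :: c :: rest := by
    match h : PySem.List.sorted arr (fun x => -x) false with
    | [] | [_] | [_, _] => rw [h] at hlen; simp at hlen
    | a :: b :: c :: rest => exact ⟨a, b, c, rest, rfl⟩
  rw [hs]
  have hrange : PySem.List.pyRange 0 3 1 = [0, 1, 2] := by decide
  rw [hrange]
  simp only [List.foldl_cons, List.foldl_nil]
  have g0 : PySem.List.pyGetD (a :: b :: c :: rest) 0 0 = a := by
    rw [show (0 : Int) = ((0 : Nat) : Int) by norm_num, PySem.List.pyGetD_natCast]; rfl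
  have g1 : PySem.List.pyGetD (a :: b :: c :: rest) 1 0 = b := by
    rw [show (1 : Int) = ((1 : Nat) : Int) by norm_num, PySem.List.pyGetD_natCast]; rfl
  have g2 : PySem.List.pyGetD (a :: b :: c :: rest) 2 0 = c := by
    rw [show (2 : Int) = ((2 : Nat) : Int) by norm_num, PySem.List.pyGetD_natCast]; rfl
  simp only [g0, g1, g2]
  rw [PySem.List.foldl_append_if_eq_filter]
  rw [List.nil_append]
  apply List.filter_congr
  intro v _
  rw [← Bool.coe_iff_coe]
  simp only [Bool.not_eq_eq_eq_not, Bool.not_true]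
  simp [pvEnc, PySem.Set.mem_add, PySem.Set.empty]
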